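-- pv_equiv track=rewrite | github.com/mn-48/AlgoExpert | subarray-sort.py | subarraySort
-- ===== SOURCE A (Python) =====
-- def subarraySort(array):
--     left , right = -1, -1
--
--     max_val, min_val = array[0], array[-1]
--
--     for i, el in enumerate(array):
--         if el < max_val:
--             left = i
--         else:
--             max_val = el
--
--
--     for i, el in reversed(list(enumerate(array))):
--         if el > min_val:
--             right = i
--         else:
--             min_val = el
--     return [right, left]
-- ===== SOURCE B (Python) =====
-- def subarraySort(array):
--     n = len(array)
--     # indices whose value sits below the max of the prefix ending at them
--     bad_r = [i for i in range(n) if array[i] < max(array[:i + 1])]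
--     # indices whose value sits above the min of the suffix starting at them
--     bad_l = [i for i in range(n) if array[i] > min(array[i:])]
--     return [bad_l[0] if bad_l else -1, bad_r[-1] if bad_r else -1]
-- ===== Notes on version B (the rewrite author's own statement) =====
-- stated objective: alternative
-- what changed: A runs two stateful accumulator scans (running prefix-max / suffix-min with last-written index variables); B instead characterises the bad indices directly, filtering range(n) by comparing each element against max of its prefix slice and min of its suffix slice, then takes the first/last bad index.
import Mathlib
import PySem

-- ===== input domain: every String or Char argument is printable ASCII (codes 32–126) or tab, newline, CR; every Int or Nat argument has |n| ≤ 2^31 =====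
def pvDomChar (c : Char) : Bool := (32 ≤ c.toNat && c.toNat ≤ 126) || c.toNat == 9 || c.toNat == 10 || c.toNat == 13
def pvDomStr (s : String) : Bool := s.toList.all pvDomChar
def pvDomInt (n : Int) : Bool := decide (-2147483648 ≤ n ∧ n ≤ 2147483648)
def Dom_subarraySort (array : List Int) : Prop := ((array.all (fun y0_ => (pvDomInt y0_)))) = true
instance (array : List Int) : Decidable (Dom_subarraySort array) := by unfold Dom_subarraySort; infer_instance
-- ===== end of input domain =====

-- B replaces A's two stateful accumulator scans by a direct filter of the index range
-- against prefix-max / suffix-min slices (objective: alternative; not faster).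
-- A raises IndexError on the empty list (array[0]); Pre_ excludes exactly that input
-- (B happens to return [-1, -1] there, but nothing is claimed about it).

-- ===== PORT A =====
-- loop body of A's first for-loop (if el < max_val: left = i else: max_val = el)
def stepA (st : Int × Int) (p : Int × Int) : Int × Int :=
  if p.2 < st.2 then (p.1, st.2) else (st.1, p.2)

-- loop body of A's second for-loop (if el > min_val: right = i else: min_val = el)
def stepA' (st : Int × Int) (p : Int × Int) : Int × Int :=
  if p.2 > st.2 then (p.1, st.2) else (st.1, p.2)

def subarraySort (array : List Int) : List Int :=
  match array with
  | [] => []     -- array[0] raises IndexError here; excluded by Pre_subarraySort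
  | a :: rest =>
    let s1 := (PySem.List.enumerate (a :: rest) 0).foldl stepA (-1, a)
    let s2 := ((PySem.List.enumerate (a :: rest) 0).reverse).foldl stepA'
                (-1, (a :: rest).getLast (by simp))
    [s2.1, s1.1]

-- ===== PORT B =====
-- max(l) / min(l) for nonempty l (Python raises on []; never reached by B's comprehensions)
def pymax (l : List Int) : Int := match l with | [] => 0 | x :: t => t.foldl max x
def pymin (l : List Int) : Int := match l with | [] => 0 | x :: t => t.foldl min x

def subarraySort_alt (array : List Int) : List Int :=
  let n := array.length
  let badR := (List.range n).filter (fun i => array.getD i 0 < pymax (array.take (i + 1)))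
  let badL := (List.range n).filter (fun i => array.getD i 0 > pymin (array.drop i))
  [if badL.isEmpty then (-1 : Int) else ((badL.headD 0 : Nat) : Int),
   if badR.isEmpty then (-1 : Int) else ((badR.getLastD 0 : Nat) : Int)]

-- ===== PRECONDITION & SPEC =====
-- Pre_ excludes exactly the empty list, on which A raises IndexError.
def Pre_subarraySort (array : List Int) : Prop := array ≠ []
instance (array : List Int) : Decidable (Pre_subarraySort array) := by
  unfold Pre_subarraySort; infer_instance
def pvWitness_subarraySort : List Int := [2, 1]

def Spec_subarraySort (array : List Int) (out : List Int) : Prop := out = subarraySort_alt array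
instance (array : List Int) (out : List Int) : Decidable (Spec_subarraySort array out) := by
  unfold Spec_subarraySort; infer_instance

-- ===== CLAIM (what is proved, stated in full; the proofs are below) =====
def Claim_equal_subarraySort : Prop :=
  ∀ (array : List Int), Dom_subarraySort array → Pre_subarraySort array →
    Spec_subarraySort array (subarraySort array)

-- ===== LEMMAS AND PROOFS =====

-- B's bad-right index list, as a standalone definition for the lemmas
def badR (xs : List Int) : List Nat :=
  (List.range xs.length).filter (fun i => xs.getD i 0 < pymax (xs.take (i + 1)))

lemma pymax_append_singleton (ys : List Int) (x : Int) (h : ys ≠ []) :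
    pymax (ys ++ [x]) = max (pymax ys) x := by
  cases ys with
  | nil => simp at h
  | cons z t => simp [pymax, List.foldl_append]

lemma pymin_cons (y : Int) (ys : List Int) (h : ys ≠ []) :
    pymin (y :: ys) = min y (pymin ys) := by
  cases ys with
  | nil => simp at h
  | cons z t =>
    show (z :: t).foldl min y = min y (t.foldl min z)
    show t.foldl min (min y z) = _
    exact List.foldl_assoc

lemma badR_append_singleton (ys : List Int) (x : Int) (h : ys ≠ []) :
    badR (ys ++ [x]) = badR ys ++ (if x < pymax ys then [ys.length] else []) := by
  unfold badR
  rw [List.length_append, List.length_singleton, List.range_succ, List.filter_append]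
  congr 1
  · apply List.filter_congr
    intro i hi
    rw [List.mem_range] at hi
    rw [List.getD_append _ _ _ _ hi, List.take_append_of_le_length (by omega)]
  · have hget : (ys ++ [x]).getD ys.length 0 = x := by
      simp [List.getD]
    have htake : (ys ++ [x]).take (ys.length + 1) = ys ++ [x] := by
      apply List.take_of_length_le; simp
    simp only [List.filter_cons, List.filter_nil, hget, htake,
      pymax_append_singleton ys x h]
    by_cases hx : x < pymax ys
    · simp [hx]
    · simp [hx]

-- the forward scan of A computes (last bad-right index, prefix max)
lemma fwd (xs : List Int) (hx : xs ≠ []) :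
    (PySem.List.enumerate xs 0).foldl stepA (-1, xs.headD 0)
      = ((badR xs).getLast?.elim (-1 : Int) (fun i => (i : Int)), pymax xs) := by
  induction xs using List.reverseRecOn with
  | nil => simp at hx
  | append_singleton ys x ih =>
    rcases eq_or_ne ys [] with rfl | hys'
    · simp [PySem.List.enumerate, stepA, badR, pymax, List.range_succ]
    · have hhead : (ys ++ [x]).headD 0 = ys.headD 0 := by
        obtain ⟨z, t, rfl⟩ := List.exists_cons_of_ne_nil hys'
        simp
      have henum : PySem.List.enumerate (ys ++ [x]) 0
          = PySem.List.enumerate ys 0 ++ [((ys.length : Int), x)] := by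
        rw [PySem.List.enumerate_append]
        simp [PySem.List.enumerate_cons, PySem.List.enumerate_nil]
      rw [hhead, henum, List.foldl_append, ih hys']
      rw [badR_append_singleton ys x hys', pymax_append_singleton ys x hys']
      by_cases hc : x < pymax ys
      · simp [stepA, hc, max_eq_left (le_of_lt hc)]
      · simp [stepA, hc, max_eq_right (le_of_not_gt hc)]

-- the backward scan of A computes (s + first bad-left index, suffix min)
lemma bwd (xs : List Int) (hx : xs ≠ []) (s : Int) :
    ((PySem.List.enumerate xs s).reverse).foldl stepA' (-1, xs.getLast hx)
      = (((List.range xs.length).find?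
            (fun i => xs.getD i 0 > pymin (xs.drop i))).elim (-1 : Int)
            (fun i => s + (i : Int)),
         pymin xs) := by
  induction xs generalizing s with
  | nil => simp at hx
  | cons y ys ih =>
    rcases eq_or_ne ys [] with rfl | hys'
    · simp [PySem.List.enumerate_cons, PySem.List.enumerate_nil, stepA', pymin]
    · have hlast : (y :: ys).getLast (by simp) = ys.getLast hys' := by
        exact List.getLast_cons hys'
      have henum : (PySem.List.enumerate (y :: ys) s).reverse
          = (PySem.List.enumerate ys (s + 1)).reverse ++ [(s, y)] := by
        rw [PySem.List.enumerate_cons]; simp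
      rw [hlast, henum, List.foldl_append, ih hys' (s + 1)]
      have hrange : List.range (y :: ys).length = 0 :: (List.range ys.length).map (· + 1) := by
        simp [List.range_succ_eq_map]
      have hdrop0 : (y :: ys).drop 0 = y :: ys := rfl
      have hmin : pymin (y :: ys) = min y (pymin ys) := pymin_cons y ys hys'
      rw [hrange]
      rw [List.find?_cons]
      by_cases hc : y > pymin ys
      · have hcond : decide ((y :: ys).getD 0 0 > pymin ((y :: ys).drop 0)) = true := by
          simp [hdrop0, hmin, hc]
        rw [hcond]
        simp [stepA', hc, hmin, min_eq_right (le_of_lt hc)]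
      · have hcond : decide ((y :: ys).getD 0 0 > pymin ((y :: ys).drop 0)) = false := by
          simp [hdrop0, hmin]
          omega
        rw [hcond]
        have hfind : List.find? (fun i => decide ((y :: ys).getD i 0 > pymin ((y :: ys).drop i)))
              ((List.range ys.length).map (· + 1))
            = (List.find? (fun i => decide (ys.getD i 0 > pymin (ys.drop i)))
                (List.range ys.length)).map (· + 1) := by
          rw [List.find?_map]
          apply congrArg
          rfl
        rw [hfind]
        have hminv : min y (pymin ys) = y := min_eq_left (le_of_not_gt hc)
        cases hfo : List.find? (fun i => decide (ys.getD i 0 > pymin (ys.drop i)))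
            (List.range ys.length) with
        | none => simp [stepA', hc, hmin, hminv]
        | some k =>
          simp [stepA', hc, hmin, hminv]
          ring

-- head of a filter is find?
lemma head_filter_eq_find? {α : Type} (p : α → Bool) (l : List α) :
    (l.filter p).head? = l.find? p := by
  induction l with
  | nil => rfl
  | cons x t ih =>
    rw [List.filter_cons, List.find?_cons]
    by_cases h : p x
    · simp [h]
    · simp [h, ih]

lemma elim_getLast? (l : List Nat) :
    (l.getLast?.elim (-1 : Int) fun i => (i : Int))
      = if l.isEmpty then (-1 : Int) else ((l.getLastD 0 : Nat) : Int) := by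
  cases l with
  | nil => rfl
  | cons b bt =>
    cases h : (b :: bt).getLast? with
    | none => simp at h
    | some k => simp [List.getLastD_eq_getLast?, h]

lemma elim_find?_filter (p : Nat → Bool) (l : List Nat) :
    ((l.find? p).elim (-1 : Int) fun i => (0 : Int) + (i : Int))
      = if (l.filter p).isEmpty then (-1 : Int) else (((l.filter p).headD 0 : Nat) : Int) := by
  rw [← head_filter_eq_find?]
  cases l.filter p <;> simp

-- ===== VERDICT (by name: the statement is the Claim_ definition above) =====
theorem subarraySort_spec : Claim_equal_subarraySort := by
  intro array _ hpre
  unfold Spec_subarraySort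
  cases array with
  | nil => exact absurd rfl hpre
  | cons a rest =>
    show subarraySort (a :: rest) = subarraySort_alt (a :: rest)
    unfold subarraySort subarraySort_alt
    have h1 := fwd (a :: rest) (by simp)
    have h2 := bwd (a :: rest) (by simp) 0
    simp only [List.headD_cons, badR] at h1
    simp only [h1, h2]
    rw [elim_find?_filter, elim_getLast?]
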